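-- pv_equiv track=rewrite | github.com/Yossari4n/AdventOfCode2021 | pyDvent/Year2021/syntax_scoring.py | score_fix
-- ===== SOURCE A (Python) =====
-- def score_fix(fix):
--     scores = {
--         ')': 1,
--         ']': 2,
--         '}': 3,
--         '>': 4
--     }
--
--     score = 0
--     for character in fix:
--         score = (score * 5) + scores[character]
--
--     return score
-- ===== SOURCE B (Python) =====
-- def score_fix(fix):
--     scores = {
--         ')': 1,
--         ']': 2,
--         '}': 3,
--         '>': 4
--     }
--
--     total = 0
--     power = 1
--     for character in reversed(fix):
--         total += scores[character] * power
--         power *= 5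
--     return total
-- ===== Notes on version B (the rewrite author's own statement) =====
-- stated objective: alternative
-- what changed: Computes the score as an explicit base-5 polynomial over reversed(fix) with a running power weight instead of Horner's accumulator-rescaling fold.
import Mathlib
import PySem

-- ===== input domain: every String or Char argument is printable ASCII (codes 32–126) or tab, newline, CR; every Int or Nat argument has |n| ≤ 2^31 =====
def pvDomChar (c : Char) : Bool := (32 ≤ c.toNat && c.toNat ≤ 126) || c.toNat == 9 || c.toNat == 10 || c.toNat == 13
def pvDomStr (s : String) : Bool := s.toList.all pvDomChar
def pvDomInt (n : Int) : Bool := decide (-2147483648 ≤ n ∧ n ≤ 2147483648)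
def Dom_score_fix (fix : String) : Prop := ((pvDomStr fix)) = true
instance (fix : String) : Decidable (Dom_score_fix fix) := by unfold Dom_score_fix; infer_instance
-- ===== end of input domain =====

-- B computes the same score as an explicit base-5 polynomial over the reversed string
-- with a running power weight, instead of A's Horner accumulator-rescaling fold.

-- ===== PORT A =====
-- scores[c]; Pre_ restricts to the four keys, so the `0` default is never reached inside Pre_
def pvScore (c : Char) : Int :=
  (PySem.Dict.empty.insert ')' (1 : Int) |>.insert ']' 2 |>.insert '}' 3 |>.insert '>' 4).getD c 0

def score_fix (fix : String) : Int :=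
  fix.toList.foldl (fun score character => score * 5 + pvScore character) 0

-- ===== PORT B =====
def score_fix_alt (fix : String) : Int :=
  (fix.toList.reverse.foldl
    (fun (tp : Int × Int) character => (tp.1 + pvScore character * tp.2, tp.2 * 5))
    (0, 1)).1

-- ===== PRECONDITION & SPEC =====
-- Pre_ excludes exactly the strings containing a character other than ) ] } > : there A raises KeyError.
def Pre_score_fix (fix : String) : Prop :=
  fix.toList.all (fun c => c == ')' || c == ']' || c == '}' || c == '>') = true
instance (fix : String) : Decidable (Pre_score_fix fix) := by unfold Pre_score_fix; infer_instance

def pvWitness_score_fix : String := "}}]])>"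

def Spec_score_fix (fix : String) (out : Int) : Prop := out = score_fix_alt fix
instance (fix : String) (out : Int) : Decidable (Spec_score_fix fix out) := by unfold Spec_score_fix; infer_instance

-- ===== CLAIM =====
def Claim_equal_score_fix : Prop := ∀ (fix : String), Dom_score_fix fix → Pre_score_fix fix → Spec_score_fix fix (score_fix fix)

-- ===== LEMMAS AND PROOFS =====

-- B's fold over l computes (t + p * Horner(l.reverse), p * 5 ^ |l|).
theorem alt_fold (l : List Char) (t p : Int) :
    l.foldl (fun (tp : Int × Int) c => (tp.1 + pvScore c * tp.2, tp.2 * 5)) (t, p)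
      = (t + p * l.reverse.foldl (fun score c => score * 5 + pvScore c) 0, p * 5 ^ l.length) := by
  induction l generalizing t p with
  | nil => simp
  | cons x xs ih =>
    simp only [List.foldl_cons, List.reverse_cons, List.foldl_append, List.foldl_cons,
      List.foldl_nil, List.length_cons]
    rw [ih]
    exact Prod.ext (by ring) (by ring)

-- ===== VERDICT =====
theorem score_fix_spec : Claim_equal_score_fix := by
  intro fix _ _
  unfold Spec_score_fix score_fix score_fix_alt
  rw [alt_fold]
  simp
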